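-- pv_equiv track=rewrite | github.com/AlexWUrobot/leetcode_python | Get Min Cost Data.py | get_min_cost_data
-- ===== SOURCE A (Python) =====
-- def get_min_cost_data(data):
--     # Initialize an array to keep track of character counts (26 letters)
--     count = [0] * 26
--
--     # Count occurrences of non-'?' characters
--     for char in data:
--         if char != '?':
--             count[ord(char) - ord('a')] += 1
--
--     cost = 0
--     result = []
--     for char in data:
--         if char != '?':
--             # Append non-'?' characters to the result
--             result.append(char)
--             # Update cost based on character count
--             cost += count[ord(char) - ord('a')] - 1
--         else:
--             # Find the minimum value from the count array
--             min_value = min(count)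
--             # Get the index of the minimum value
--             min_index = count.index(min_value)
--             # Determine the corresponding character
--             min_char = chr(ord('a') + min_index)
--             # Append the chosen character to the result
--             result.append(min_char)
--             # Update count and cost
--             count[min_index] += 1
--             cost += 1
--
--     return ''.join(result)
-- ===== SOURCE B (Python) =====
-- def get_min_cost_data(data):
--     # Count occurrences of non-'?' characters (same first pass as the original).
--     count = [0] * 26
--     for char in data:
--         if char != '?':
--             count[ord(char) - ord('a')] += 1
--     # Each '?' takes the currently least-frequent letter (smallest letter on ties).
--     # The j-th time letter i could be chosen it carries weight count[i]+j, so the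
--     # chosen letters, in the order they are assigned, are exactly the k smallest
--     # encoded keys (count[i]+j)*26+i in increasing order.
--     k = sum(1 for char in data if char == '?')
--     keys = sorted((count[i] + j) * 26 + i for i in range(26) for j in range(k))
--     picks = [chr(ord('a') + key % 26) for key in keys[:k]]
--     out = []
--     qi = 0
--     for char in data:
--         if char == '?':
--             out.append(picks[qi])
--             qi += 1
--         else:
--             out.append(char)
--     return ''.join(out)
-- ===== Notes on version B (the rewrite author's own statement) =====
-- stated objective: alternative
-- what changed: A rescans the 26-counter array for every '?' (min + index + in-place increment interleaved with building the result); B keeps A's counting pass, then computes all replacement letters at once as the k smallest encoded keys (count[i]+j)*26+i of one sort (the j-th use of letter i costs count[i]+j, ties break to the smaller letter), and substitutes them into the '?' slots in a final pass.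
import Mathlib
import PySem

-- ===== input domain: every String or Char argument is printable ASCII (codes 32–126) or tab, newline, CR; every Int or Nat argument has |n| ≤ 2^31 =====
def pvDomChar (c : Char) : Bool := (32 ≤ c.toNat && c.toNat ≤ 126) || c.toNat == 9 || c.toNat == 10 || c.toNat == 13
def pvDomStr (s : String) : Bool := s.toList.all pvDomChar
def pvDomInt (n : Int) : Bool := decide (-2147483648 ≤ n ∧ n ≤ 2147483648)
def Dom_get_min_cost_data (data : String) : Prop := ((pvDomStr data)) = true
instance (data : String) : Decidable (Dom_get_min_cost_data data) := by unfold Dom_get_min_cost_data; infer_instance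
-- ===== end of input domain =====

-- B replaces A's per-'?' rescan of the 26-counter array (min + index + increment) by one
-- closed-form batch: the letters assigned to the '?', in order, are exactly the k smallest
-- encoded keys (count[i]+j)*26+i, obtained by a single sort. Objective: alternative
-- (different algorithm, similar cost).

-- ===== PORT A =====
-- first counting loop (textually identical in A and in B, so shared by both ports);
-- ord(char)-ord('a') can be negative: pySetD/pyGetD give Python's negative-index wraparound
def pvBuildCount (cs : List Char) : List Int :=
  cs.foldl
    (fun count c =>
      if c ≠ '?' then
        PySem.List.pySetD count ((c.toNat : Int) - 97)
          (PySem.List.pyGetD count ((c.toNat : Int) - 97) 0 + 1)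
      else count)
    (List.replicate 26 0)

-- one iteration of A's second loop; state = (count, cost, result)
def pvStepA (s : List Int × Int × List Char) (c : Char) : List Int × Int × List Char :=
  if c ≠ '?' then
    (s.1, s.2.1 + PySem.List.pyGetD s.1 ((c.toNat : Int) - 97) 0 - 1, s.2.2 ++ [c])
  else
    let mv := (PySem.List.min? s.1 (fun x => x)).getD 0
    let mi := (PySem.List.index? s.1 mv).getD 0
    let mc := Char.ofNat (97 + mi)
    (PySem.List.pySetD s.1 (mi : Int) (PySem.List.pyGetD s.1 (mi : Int) 0 + 1),
     s.2.1 + 1, s.2.2 ++ [mc])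

def get_min_cost_data (data : String) : String :=
  let count := pvBuildCount data.toList
  let r := data.toList.foldl pvStepA (count, 0, [])
  String.ofList r.2.2

-- ===== PORT B =====
def get_min_cost_data_alt (data : String) : String :=
  let count := pvBuildCount data.toList
  let k : Int := (data.toList.map (fun c => if c == '?' then (1 : Int) else 0)).sum
  let keys := PySem.List.sorted
    ((PySem.List.pyRange 0 26 1).flatMap (fun i =>
      (PySem.List.pyRange 0 k 1).map (fun j =>
        (PySem.List.pyGetD count i 0 + j) * 26 + i)))
    (fun x => x) false
  let picks := (PySem.List.slice keys none (some k)).map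
    (fun key => Char.ofNat (97 + (PySem.Int.mod key 26).toNat))
  let r := data.toList.foldl
    (fun (s : List Char × Int) c =>
      if c == '?' then (s.1 ++ [PySem.List.pyGetD picks s.2 'a'], s.2 + 1)
      else (s.1 ++ [c], s.2))
    ([], 0)
  String.ofList r.1

-- ===== PRECONDITION & SPEC =====
-- Pre_ excludes exactly the inputs on which the Python A raises IndexError: a character
-- c ≠ '?' with ord(c) - ord('a') outside [-26, 25], i.e. ord(c) < 71 or ord(c) > 122.
def Pre_get_min_cost_data (data : String) : Prop :=
  (data.toList.all (fun c => c == '?' || (71 ≤ c.toNat && c.toNat ≤ 122))) = true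
instance (data : String) : Decidable (Pre_get_min_cost_data data) := by
  unfold Pre_get_min_cost_data; infer_instance

def pvWitness_get_min_cost_data : String := "ab?z`G?q"

def Spec_get_min_cost_data (data : String) (out : String) : Prop := out = get_min_cost_data_alt data
instance (data : String) (out : String) : Decidable (Spec_get_min_cost_data data out) := by
  unfold Spec_get_min_cost_data; infer_instance

-- ===== CLAIM (what is proved, stated in full; the proofs are below) =====
def Claim_equal_get_min_cost_data : Prop := ∀ (data : String), Dom_get_min_cost_data data → Pre_get_min_cost_data data → Spec_get_min_cost_data data (get_min_cost_data data)

-- ===== LEMMAS AND PROOFS =====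


def pvEnc (v : Int) (i : Nat) : Int := v * 26 + (i : Int)
def pvKl (count : List Int) (k : Nat) : List Int :=
  (List.range 26).flatMap (fun i =>
    (List.range k).map (fun (j : Nat) => pvEnc (count.getD i 0 + (j : Int)) i))

lemma pv_enc_inj {v w : Int} {i j : Nat} (hi : i < 26) (hj : j < 26)
    (h : pvEnc v i = pvEnc w j) : v = w ∧ i = j := by
  unfold pvEnc at h; omega

lemma pv_nodup_Kl (count : List Int) (k : Nat) : (pvKl count k).Nodup := by
  unfold pvKl
  rw [List.nodup_flatMap]
  constructor
  · intro i _
    refine List.Nodup.map ?_ (List.nodup_range)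
    intro a b hab
    simp only [pvEnc] at hab
    omega
  · refine (List.pairwise_lt_range).imp_of_mem ?_
    intro a b ha hb hlt x hxa hxb
    simp only [List.mem_map] at hxa hxb
    obtain ⟨ja, -, hja⟩ := hxa
    obtain ⟨jb, -, hjb⟩ := hxb
    have := pv_enc_inj (List.mem_range.mp ha) (List.mem_range.mp hb) (hja.trans hjb.symm)
    omega


lemma pv_sorted_pairwise_lt (l : List Int) (h : l.Nodup) :
    (PySem.List.sorted l (fun x => x) false).Pairwise (· < ·) := by
  have hp := PySem.List.sorted_pairwise l (fun x => x)
  have hn : (PySem.List.sorted l (fun x => x) false).Nodup :=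
    ((PySem.List.sorted_perm l (fun x => x) false).symm).nodup h
  exact (hp.and hn).imp (fun hab => lt_of_le_of_ne hab.1 hab.2)

lemma pv_sorted_head (l : List Int) (m : Int) (hnd : l.Nodup) (hm : m ∈ l)
    (hmin : ∀ x ∈ l, x ≠ m → m < x) :
    PySem.List.sorted l (fun x => x) false
      = m :: PySem.List.sorted (l.erase m) (fun x => x) false := by
  apply PySem.List.sorted_eq_of_perm_of_pairwise_lt
  · exact ((PySem.List.sorted_perm (l.erase m) (fun x => x) false).cons m).trans
      (List.perm_cons_erase hm).symm
  · refine List.Pairwise.cons ?_ (pv_sorted_pairwise_lt _ (hnd.erase m))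
    intro x hx
    have hx' : x ∈ l.erase m := ((PySem.List.sorted_perm (l.erase m) (fun y => y) false)).mem_iff.mp hx
    have := (hnd.mem_erase_iff).mp hx'
    exact hmin x this.2 this.1

lemma pv_prune_one (l : List Int) (x : Int) (k : Nat) (hnd : l.Nodup) (hx : x ∈ l)
    (hk : k ≤ (l.filter (fun y => decide (y < x))).length) :
    (PySem.List.sorted l (fun y => y) false).take k
      = (PySem.List.sorted (l.erase x) (fun y => y) false).take k := by
  set s := PySem.List.sorted l (fun y => y) false with hs
  have hper : s.Perm l := PySem.List.sorted_perm l (fun y => y) false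
  have hsp : s.Pairwise (· < ·) := pv_sorted_pairwise_lt l hnd
  have hxs : x ∈ s := hper.mem_iff.mpr hx
  obtain ⟨s₁, s₂, hdec⟩ := List.mem_iff_append.mp hxs
  have hpair : (s₁ ++ x :: s₂).Pairwise (· < ·) := hdec ▸ hsp
  have h₁ : ∀ y ∈ s₁, y < x := by
    intro y hy
    exact (List.pairwise_append.mp hpair).2.2 y hy x List.mem_cons_self
  have h₂ : ∀ y ∈ s₂, x < y :=
    fun y hy => (List.pairwise_cons.mp (List.pairwise_append.mp hpair).2.1).1 y hy
  have hfil : s.filter (fun y => decide (y < x)) = s₁ := by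
    rw [hdec, List.filter_append]
    rw [List.filter_eq_self.mpr (by intro y hy; simpa using h₁ y hy)]
    rw [List.filter_eq_nil_iff.mpr ?_, List.append_nil]
    intro y hy
    simp only [List.mem_cons] at hy
    rcases hy with rfl | hy
    · simp
    · simp [not_lt.mpr (le_of_lt (h₂ y hy))]
  have hlen1 : k ≤ s₁.length := by
    have := (hper.filter (fun y => decide (y < x))).length_eq
    rw [hfil] at this
    omega
  have hxnot1 : x ∉ s₁ := fun hc => lt_irrefl x (h₁ x hc)
  have herase : PySem.List.sorted (l.erase x) (fun y => y) false = s₁ ++ s₂ := by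
    apply PySem.List.sorted_eq_of_perm_of_pairwise_lt
    · have h1 : s.erase x = s₁ ++ s₂ := by
        rw [hdec, List.erase_append_right _ hxnot1, List.erase_cons_head]
      exact h1 ▸ (hper.erase x)
    · exact hpair.sublist ((List.sublist_cons_self x s₂).append_left s₁)
  rw [herase, hdec, List.take_append_of_le_length hlen1,
      List.take_append_of_le_length hlen1]

lemma pv_prune (b : List Int) (e : List Int) (k : Nat) (hnd : (b ++ e).Nodup)
    (he : ∀ x ∈ e, k ≤ (b.filter (fun y => decide (y < x))).length) :
    (PySem.List.sorted (b ++ e) (fun y => y) false).take k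
      = (PySem.List.sorted b (fun y => y) false).take k := by
  induction e with
  | nil => simp
  | cons y e' ih =>
    have hperm : (b ++ y :: e').Perm ((b ++ e') ++ [y]) :=
      List.perm_middle.trans (List.perm_append_singleton y (b ++ e')).symm
    have hnd2 : (y :: (b ++ e')).Nodup := List.perm_middle.nodup hnd
    have hys : y ∉ b ++ e' := (List.nodup_cons.mp hnd2).1
    have hnd3 : (b ++ e').Nodup := (List.nodup_cons.mp hnd2).2
    have hnd' : ((b ++ e') ++ [y]).Nodup := hperm.nodup hnd
    rw [PySem.List.sorted_eq_sorted_of_perm _ _ _ (fun a b h => h) hperm]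
    rw [pv_prune_one ((b ++ e') ++ [y]) y k hnd' (by simp) ?_]
    · rw [List.erase_append_right _ hys, List.erase_cons_head, List.append_nil]
      exact ih hnd3 (fun x hx => he x (List.mem_cons_of_mem y hx))
    · calc k ≤ (b.filter (fun z => decide (z < y))).length := he y List.mem_cons_self
        _ ≤ (((b ++ e') ++ [y]).filter (fun z => decide (z < y))).length := by
            apply List.Sublist.length_le
            apply List.Sublist.filter
            exact ((b.sublist_append_left e').trans ((b ++ e').sublist_append_left [y]))

def pvGreedy (count : List Int) : Nat → List Int
  | 0 => []
  | Nat.succ k =>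
    let mv := (PySem.List.min? count (fun x => x)).getD 0
    let mi := (PySem.List.index? count mv).getD 0
    pvEnc mv mi ::
      pvGreedy (PySem.List.pySetD count (mi : Int) (PySem.List.pyGetD count (mi : Int) 0 + 1)) k

lemma pv_flatMap_append_singleton (l : List Nat) (g : Nat → List Int) (e : Nat → Int) :
    (l.flatMap (fun i => g i ++ [e i])).Perm (l.flatMap g ++ l.map e) := by
  induction l with
  | nil => simp
  | cons a t ih =>
    simp only [List.flatMap_cons, List.map_cons]
    rw [List.append_assoc, List.append_assoc]
    refine List.Perm.append_left (g a) ?_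
    exact ((ih.cons (e a)).trans List.perm_middle.symm)

-- pick facts
lemma pv_pick_facts (count : List Int) (hlen : count.length = 26) :
    ∃ mv mi, PySem.List.min? count (fun x => x) = some mv ∧
      PySem.List.index? count mv = some mi ∧ mi < 26 ∧ count.getD mi 0 = mv ∧
      (∀ y ∈ count, mv ≤ y) ∧ (∀ j, j < mi → count.getD j 0 ≠ mv) := by
  have hne : count ≠ [] := by intro h; rw [h] at hlen; simp at hlen
  obtain ⟨mv, hmv⟩ : ∃ mv, PySem.List.min? count (fun x => x) = some mv := by
    cases h : PySem.List.min? count (fun x => x) with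
    | none => exact absurd ((PySem.List.min?_eq_none_iff count _).mp h) hne
    | some m => exact ⟨m, rfl⟩
  have hmem : mv ∈ count := PySem.List.min?_mem hmv
  obtain ⟨mi, hmi⟩ : ∃ mi, PySem.List.index? count mv = some mi := by
    have := (PySem.List.index?_isSome_iff count mv).mpr hmem
    cases h : PySem.List.index? count mv with
    | none => rw [h] at this; simp at this
    | some i => exact ⟨i, rfl⟩
  obtain ⟨hk, hget, hfirst⟩ := PySem.List.getElem_of_index?_eq_some hmi
  refine ⟨mv, mi, hmv, hmi, by omega, ?_, PySem.List.min?_isMin hmv, ?_⟩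
  · rw [List.getD_eq_getElem count 0 hk]; exact hget
  · intro j hj
    have hjlen : j < count.length := by omega
    rw [List.getD_eq_getElem count 0 hjlen]
    exact hfirst j hj

lemma pv_getD_set (l : List Int) (mi : Nat) (v : Int) (h : mi < l.length) (i : Nat) :
    (l.set mi v).getD i 0 = if i = mi then v else l.getD i 0 := by
  by_cases hi : i = mi
  · subst hi; simp [List.getD_eq_getElem?_getD, h]
  · simp [List.getD_eq_getElem?_getD, Ne.symm hi, hi]

lemma pv_getD_mem (l : List Int) (i : Nat) (h : i < l.length) : l.getD i 0 ∈ l := by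
  rw [List.getD_eq_getElem l 0 h]; exact List.getElem_mem h

lemma pv_core (count : List Int) (k : Nat) (hlen : count.length = 26) :
    (PySem.List.sorted (pvKl count k) (fun x => x) false).take k = pvGreedy count k := by
  induction k generalizing count with
  | zero => simp [pvGreedy]
  | succ k ih =>
    obtain ⟨mv, mi, hmv, hmi, hmi26, hget, hmin, hfirst⟩ := pv_pick_facts count hlen
    set count' := count.set mi (mv + 1) with hc'
    have hmilen : mi < count.length := by omega
    have hgr : pvGreedy count (k + 1) = pvEnc mv mi :: pvGreedy count' k := by
      simp only [pvGreedy, hmv, hmi, Option.getD_some, PySem.List.pySetD_natCast,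
        PySem.List.pyGetD_natCast, hget, hc']
    have hlen' : count'.length = 26 := by simp [hc', hlen]
    have hset : ∀ i : Nat, count'.getD i 0 = if i = mi then mv + 1 else count.getD i 0 :=
      fun i => pv_getD_set count mi (mv + 1) hmilen i
    set e : Nat → Int :=
      fun i => if i = mi then pvEnc mv mi else pvEnc (count.getD i 0 + (k : Int)) i with he
    -- per-block permutation
    have hblocks : ∀ i ∈ List.range 26,
        ((List.range (k+1)).map (fun (j : Nat) => pvEnc (count.getD i 0 + (j : Int)) i)).Perm
        ((List.range k).map (fun (j : Nat) => pvEnc (count'.getD i 0 + (j : Int)) i) ++ [e i]) := by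
      intro i _
      by_cases hcase : i = mi
      · subst hcase
        rw [List.range_succ_eq_map]
        simp only [List.map_cons, List.map_map]
        have h0 : pvEnc (count.getD i 0 + ((0 : Nat) : Int)) i = pvEnc mv i := by
          rw [hget]; norm_num
        have htail : (List.range k).map ((fun (j : Nat) => pvEnc (count.getD i 0 + (j : Int)) i) ∘ Nat.succ)
            = (List.range k).map (fun (j : Nat) => pvEnc (count'.getD i 0 + (j : Int)) i) := by
          apply List.map_congr_left
          intro j _
          simp only [Function.comp_apply, hset, hget, pvEnc]
          push_cast
          ring
        rw [h0, htail]
        simp only [he, if_pos rfl]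
        exact (List.perm_append_singleton _ _).symm
      · rw [List.range_succ, List.map_append]
        have htail : (List.range k).map (fun (j : Nat) => pvEnc (count.getD i 0 + (j : Int)) i)
            = (List.range k).map (fun (j : Nat) => pvEnc (count'.getD i 0 + (j : Int)) i) := by
          apply List.map_congr_left
          intro j _
          rw [hset, if_neg hcase]
        rw [htail, he]
        simp only [if_neg hcase, List.map_cons]
        rfl
    have hKperm : (pvKl count (k+1)).Perm (pvKl count' k ++ (List.range 26).map e) := by
      unfold pvKl
      exact (List.Perm.flatMap_left (List.range 26) hblocks).trans
        (pv_flatMap_append_singleton (List.range 26) _ e)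
    have hm_e : e mi = pvEnc mv mi := by simp [he]
    have hm_in_mapE : pvEnc mv mi ∈ (List.range 26).map e := by
      rw [← hm_e]; exact List.mem_map_of_mem (List.mem_range.mpr hmi26)
    have hm_not : pvEnc mv mi ∉ pvKl count' k := by
      intro hc
      unfold pvKl at hc
      simp only [List.mem_flatMap, List.mem_map, List.mem_range] at hc
      obtain ⟨i, hi26, j, hj, hji⟩ := hc
      obtain ⟨hvw, hii⟩ := pv_enc_inj hi26 hmi26 hji
      subst hii
      rw [hset, if_pos rfl] at hvw
      omega
    have hnodupK : (pvKl count (k+1)).Nodup := pv_nodup_Kl count (k+1)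
    have hmin_l : ∀ x ∈ pvKl count (k+1), x ≠ pvEnc mv mi → pvEnc mv mi < x := by
      intro x hx hne
      unfold pvKl at hx
      simp only [List.mem_flatMap, List.mem_map, List.mem_range] at hx
      obtain ⟨i, hi26, j, hj, rfl⟩ := hx
      have hvmem : count.getD i 0 ∈ count := pv_getD_mem count i (by omega)
      have hle : mv ≤ count.getD i 0 := hmin _ hvmem
      by_cases hv : mv < count.getD i 0 + (j : Int)
      · unfold pvEnc at hne ⊢; omega
      · have hvq : count.getD i 0 = mv := by omega
        have hj0 : (j : Int) = 0 := by omega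
        have hine : i ≠ mi := by
          intro hc; subst hc; apply hne
          unfold pvEnc; omega
        have higt : mi < i := by
          rcases lt_trichotomy i mi with h | h | h
          · exact absurd hvq (hfirst i h)
          · exact absurd h hine
          · exact h
        unfold pvEnc; omega
    have hm_in : pvEnc mv mi ∈ pvKl count (k+1) :=
      hKperm.mem_iff.mpr (List.mem_append_right _ hm_in_mapE)
    rw [pv_sorted_head _ (pvEnc mv mi) hnodupK hm_in hmin_l, List.take_succ_cons, hgr]
    congr 1
    have hErase : ((pvKl count (k+1)).erase (pvEnc mv mi)).Perm
        (pvKl count' k ++ ((List.range 26).map e).erase (pvEnc mv mi)) := by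
      have h1 := hKperm.erase (pvEnc mv mi)
      rwa [List.erase_append_right _ hm_not] at h1
    rw [PySem.List.sorted_eq_sorted_of_perm _ _ _ (fun a b h => h) hErase]
    set extras := ((List.range 26).map e).erase (pvEnc mv mi) with hex
    have hndBE : (pvKl count' k ++ extras).Nodup := hErase.nodup (hnodupK.erase _)
    have hmapE_nodup : ((List.range 26).map e).Nodup := by
      apply List.Nodup.map_on ?_ List.nodup_range
      intro a ha b hb hab
      have ha26 := List.mem_range.mp ha
      have hb26 := List.mem_range.mp hb
      have h1 : e a = pvEnc (if a = mi then mv else count.getD a 0 + (k : Int)) a := by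
        by_cases h : a = mi <;> simp [he, h]
      have h2 : e b = pvEnc (if b = mi then mv else count.getD b 0 + (k : Int)) b := by
        by_cases h : b = mi <;> simp [he, h]
      rw [h1, h2] at hab
      exact (pv_enc_inj ha26 hb26 hab).2
    have hextras : ∀ x ∈ extras, k ≤ ((pvKl count' k).filter (fun y => decide (y < x))).length := by
      intro x hx
      have hx' := hmapE_nodup.mem_erase_iff.mp hx
      obtain ⟨i, hi26m, rfl⟩ := List.mem_map.mp hx'.2
      have hi26 : i < 26 := List.mem_range.mp hi26m
      have hine : i ≠ mi := by
        intro hc; subst hc; exact hx'.1 hm_e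
      have hei : e i = pvEnc (count.getD i 0 + (k : Int)) i := by simp [he, hine]
      rw [hei]
      set blk := (List.range k).map (fun (j : Nat) => pvEnc (count'.getD i 0 + (j : Int)) i) with hblk
      have hblk_sub : List.Sublist blk (pvKl count' k) := by
        unfold pvKl
        rw [List.flatMap_def]
        exact List.sublist_flatten_of_mem (List.mem_map_of_mem hi26m)
      have hblk_filt : blk.filter (fun y => decide (y < pvEnc (count.getD i 0 + (k : Int)) i)) = blk := by
        apply List.filter_eq_self.mpr
        intro y hy
        rw [hblk] at hy
        obtain ⟨j, hjk, rfl⟩ := List.mem_map.mp hy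
        have hjk' := List.mem_range.mp hjk
        rw [hset, if_neg hine]
        unfold pvEnc
        simp only [decide_eq_true_eq]
        omega
      have h3 : k ≤ (blk.filter (fun y => decide (y < pvEnc (count.getD i 0 + (k : Int)) i))).length := by
        rw [hblk_filt, hblk]; simp
      exact h3.trans (List.Sublist.length_le (hblk_sub.filter _))
    rw [pv_prune (pvKl count' k) extras k hndBE hextras]
    exact ih count' hlen'

def pvDecode (key : Int) : Char := Char.ofNat (97 + (PySem.Int.mod key 26).toNat)
def pvMerge : List Char → List Char → List Char
  | [], _ => []
  | c :: t, ps => if c = '?' then ps.headD 'a' :: pvMerge t ps.tail else c :: pvMerge t ps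

lemma pv_decode_enc (mv : Int) (mi : Nat) (h : mi < 26) :
    pvDecode (pvEnc mv mi) = Char.ofNat (97 + mi) := by
  unfold pvDecode pvEnc
  rw [PySem.Int.mod_eq_emod_of_pos (by norm_num)]
  have h2 : (mv * 26 + (mi : Int)) % 26 = (mi : Int) := by omega
  rw [h2]
  simp

lemma pv_mergeB (picks : List Char) (cs : List Char) : ∀ (out : List Char) (qi : Int),
    0 ≤ qi →
    (cs.foldl
      (fun (s : List Char × Int) c =>
        if c == '?' then (s.1 ++ [PySem.List.pyGetD picks s.2 'a'], s.2 + 1)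
        else (s.1 ++ [c], s.2))
      (out, qi)).1
      = out ++ pvMerge cs (picks.drop qi.toNat) := by
  induction cs with
  | nil => intro out qi _; simp [pvMerge]
  | cons c t ih =>
    intro out qi hqi
    rw [List.foldl_cons]
    by_cases hc : c = '?'
    · subst hc
      simp only [beq_self_eq_true, if_pos]
      rw [ih _ _ (by omega)]
      have hget : PySem.List.pyGetD picks qi 'a' = (picks.drop qi.toNat).headD 'a' := by
        have h1 : PySem.List.pyGetD picks ((qi.toNat : Nat) : Int) 'a'
            = (picks.drop qi.toNat).headD 'a' := by
          rw [PySem.List.pyGetD_natCast, List.getD_eq_getElem?_getD,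
            List.headD_eq_head?_getD, List.head?_drop]
        rwa [Int.toNat_of_nonneg hqi] at h1
      have hdrop : picks.drop (qi + 1).toNat = (picks.drop qi.toNat).tail := by
        rw [List.tail_drop]
        congr 1
        omega
      rw [hget, hdrop]
      simp [pvMerge, List.append_assoc]
    · have hbeq : (c == '?') = false := by simpa using hc
      simp only [hbeq, Bool.false_eq_true, if_false]
      rw [ih _ _ hqi]
      simp [pvMerge, hc, List.append_assoc]

lemma pv_buildCount_len (cs : List Char) : (pvBuildCount cs).length = 26 := by
  unfold pvBuildCount
  have h : ∀ (l : List Char) (count : List Int),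
      (l.foldl
        (fun count c =>
          if c ≠ '?' then
            PySem.List.pySetD count ((c.toNat : Int) - 97)
              (PySem.List.pyGetD count ((c.toNat : Int) - 97) 0 + 1)
          else count)
        count).length = count.length := by
    intro l
    induction l with
    | nil => intro count; rfl
    | cons c t ih =>
      intro count
      rw [List.foldl_cons, ih]
      split
      · rw [PySem.List.length_pySetD]
      · rfl
  rw [h]
  simp

lemma pv_mergeA (cs : List Char) : ∀ (count : List Int) (cost : Int) (res : List Char),
    count.length = 26 →
    (cs.foldl pvStepA (count, cost, res)).2.2
      = res ++ pvMerge cs ((pvGreedy count (cs.count '?')).map pvDecode) := by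
  induction cs with
  | nil => intro count cost res _; simp [pvMerge]
  | cons c t ih =>
    intro count cost res hlen
    rw [List.foldl_cons]
    by_cases hc : c = '?'
    · subst hc
      obtain ⟨mv, mi, hmv, hmi, hmi26, hget, hmin, hfirst⟩ := pv_pick_facts count hlen
      have hstep : pvStepA (count, cost, res) '?' =
          (count.set mi (mv + 1), cost + 1, res ++ [Char.ofNat (97 + mi)]) := by
        simp only [pvStepA, ne_eq, not_true_eq_false, if_false, hmv, hmi, Option.getD_some,
          PySem.List.pySetD_natCast, PySem.List.pyGetD_natCast, hget]
      rw [hstep, ih _ _ _ (by simp [hlen])]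
      have hq : ('?' :: t).count '?' = t.count '?' + 1 := List.count_cons_self
      rw [hq]
      have hgr : pvGreedy count (t.count '?' + 1)
          = pvEnc mv mi :: pvGreedy (count.set mi (mv + 1)) (t.count '?') := by
        simp only [pvGreedy, hmv, hmi, Option.getD_some, PySem.List.pySetD_natCast,
          PySem.List.pyGetD_natCast, hget]
      rw [hgr, List.map_cons]
      simp only [pvMerge, List.headD_cons, List.tail_cons]
      rw [pv_decode_enc mv mi hmi26]
      simp [List.append_assoc]
    · have hstep : pvStepA (count, cost, res) c =
          (count, cost + PySem.List.pyGetD count ((c.toNat : Int) - 97) 0 - 1, res ++ [c]) := by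
        simp only [pvStepA, if_pos hc]
      rw [hstep, ih _ _ _ hlen]
      have hq : (c :: t).count '?' = t.count '?' := by
        rw [List.count_cons]
        simp [hc]
      rw [hq]
      simp only [pvMerge, if_neg hc]
      simp [List.append_assoc]

lemma pv_keys_eq (count : List Int) (q : Nat) :
    (PySem.List.pyRange 0 26 1).flatMap (fun i =>
      (PySem.List.pyRange 0 (q : Int) 1).map (fun j =>
        (PySem.List.pyGetD count i 0 + j) * 26 + i)) = pvKl count q := by
  rw [PySem.List.pyRange_one 0 26, PySem.List.pyRange_one 0 (q : Int)]
  have h26 : ((26 : Int) - 0).toNat = 26 := by decide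
  have hq : ((q : Int) - 0).toNat = q := by omega
  rw [h26, hq, List.flatMap_map]
  unfold pvKl pvEnc
  apply List.flatMap_congr
  intro i _
  rw [List.map_map]
  apply List.map_congr_left
  intro j _
  simp [PySem.List.pyGetD_natCast]

-- ===== VERDICT (by name: the statement is the Claim_ definition above) =====
theorem get_min_cost_data_spec : Claim_equal_get_min_cost_data := by
  intro data _ _
  show get_min_cost_data data = get_min_cost_data_alt data
  have hlen := pv_buildCount_len data.toList
  have hA : get_min_cost_data data
      = String.ofList (pvMerge data.toList
          ((pvGreedy (pvBuildCount data.toList) (data.toList.count '?')).map pvDecode)) := by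
    simp only [get_min_cost_data]
    rw [pv_mergeA data.toList _ 0 [] hlen]
    rfl
  have hk : (data.toList.map (fun c => if c == '?' then (1 : Int) else 0)).sum
      = ((data.toList.count '?' : Nat) : Int) := by
    rw [PySem.List.sum_map_ite_one_zero, List.count_eq_countP]
  have hB : get_min_cost_data_alt data
      = String.ofList (pvMerge data.toList
          (((PySem.List.sorted (pvKl (pvBuildCount data.toList) (data.toList.count '?'))
              (fun x => x) false).take (data.toList.count '?')).map pvDecode)) := by
    simp only [get_min_cost_data_alt]
    rw [hk, pv_keys_eq, PySem.List.slice_to_natCast]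
    rw [pv_mergeB _ data.toList [] 0 le_rfl]
    rfl
  rw [hA, hB, pv_core _ _ hlen]
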